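-- pv_equiv track=rewrite | github.com/Vyrusspcs/weshkyv2 | source/obj/obj_server.py | classify_surface_interior
-- ===== SOURCE A (Python) =====
-- NEIGHBORS_6 = [(1,0,0),(-1,0,0),(0,1,0),(0,-1,0),(0,0,1),(0,0,-1)]
--
-- def classify_surface_interior(all_voxels):
--     """
--     Split voxels into surface (has at least one empty 6-neighbor)
--     and interior (fully surrounded).
--     """
--     surface = set()
--     interior = set()
--     for v in all_voxels:
--         is_surface = False
--         for dx, dy, dz in NEIGHBORS_6:
--             if (v[0] + dx, v[1] + dy, v[2] + dz) not in all_voxels: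
--                 is_surface = True
--                 break
--         if is_surface:
--             surface.add(v)
--         else:
--             interior.add(v)
--     return surface, interior
-- ===== SOURCE B (Python) =====
-- NEIGHBORS_6 = [(1,0,0),(-1,0,0),(0,1,0),(0,-1,0),(0,0,1),(0,0,-1)]
--
-- def classify_surface_interior(all_voxels):
--     """
--     Split voxels into surface (has at least one empty 6-neighbor)
--     and interior (fully surrounded).
--     """
--     vox = set(all_voxels)
--     # a voxel v has its d-neighbor present iff v lies in the whole set shifted by -d,
--     # so the interior is the intersection of vox with its six translates
--     interior = vox
--     for dx, dy, dz in NEIGHBORS_6: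
--         interior = interior & {(x - dx, y - dy, z - dz) for (x, y, z) in all_voxels}
--     return vox - interior, interior
-- ===== Notes on version B (the rewrite author's own statement) =====
-- stated objective: alternative
-- what changed: B has no per-voxel neighbor test at all: it forms the six whole-set translates of the voxel set and intersects them (interior = vox & shift(vox,-d) for each of the 6 directions), then derives surface by set subtraction, instead of A's per-voxel inner loop over NEIGHBORS_6 with a list-membership scan and two-bucket branching.
import Mathlib
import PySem

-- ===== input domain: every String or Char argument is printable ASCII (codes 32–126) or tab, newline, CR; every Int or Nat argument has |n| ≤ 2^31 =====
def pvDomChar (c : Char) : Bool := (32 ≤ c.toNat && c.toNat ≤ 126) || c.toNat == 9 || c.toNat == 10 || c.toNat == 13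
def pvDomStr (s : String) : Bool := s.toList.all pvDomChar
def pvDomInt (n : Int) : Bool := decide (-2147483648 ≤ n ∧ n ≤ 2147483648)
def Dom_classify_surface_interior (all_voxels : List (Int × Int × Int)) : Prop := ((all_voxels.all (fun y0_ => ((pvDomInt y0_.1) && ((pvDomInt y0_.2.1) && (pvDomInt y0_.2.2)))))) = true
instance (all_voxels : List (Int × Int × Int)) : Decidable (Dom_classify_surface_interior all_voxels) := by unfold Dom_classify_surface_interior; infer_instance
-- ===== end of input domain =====

-- B replaces A's per-voxel neighbor loop by intersecting the voxel set with its six whole-set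
-- translates (interior = vox & each shift), deriving surface by set subtraction (objective: alternative).


-- NEIGHBORS_6, shared module-level constant of both Pythons
def pvNeighbors6 : List (Int × Int × Int) :=
  [(1,0,0),(-1,0,0),(0,1,0),(0,-1,0),(0,0,1),(0,0,-1)]

-- ===== PORT A =====
-- for v: inner for/break over NEIGHBORS_6 with 'not in all_voxels' (list scan) = List.any;
-- the two result sets are built by Set.add into the chosen bucket.
def classify_surface_interior (all_voxels : List (Int × Int × Int)) : (List (Int × Int × Int)) × (List (Int × Int × Int)) :=
  all_voxels.foldl
    (fun (acc : PySem.Set (Int × Int × Int) × PySem.Set (Int × Int × Int)) v =>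
      let is_surface :=
        pvNeighbors6.any (fun d => !(all_voxels.contains (v.1 + d.1, v.2.1 + d.2.1, v.2.2 + d.2.2)))
      if is_surface then (PySem.Set.add acc.1 v, acc.2) else (acc.1, PySem.Set.add acc.2 v))
    (PySem.Set.empty, PySem.Set.empty)

-- ===== PORT B =====
-- vox = set(all_voxels); for each d in NEIGHBORS_6: interior &= set of voxels shifted by -d;
-- surface = vox - interior.
def classify_surface_interior_alt (all_voxels : List (Int × Int × Int)) : (List (Int × Int × Int)) × (List (Int × Int × Int)) :=
  let vox : PySem.Set (Int × Int × Int) := PySem.Set.ofList all_voxels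
  let interior : PySem.Set (Int × Int × Int) :=
    pvNeighbors6.foldl
      (fun acc d =>
        PySem.Set.inter acc
          (PySem.Set.ofList (all_voxels.map (fun u => (u.1 - d.1, u.2.1 - d.2.1, u.2.2 - d.2.2)))))
      vox
  (PySem.Set.diff vox interior, interior)

-- ===== PRECONDITION & SPEC =====
def Spec_classify_surface_interior (all_voxels : List (Int × Int × Int)) (out : (List (Int × Int × Int)) × (List (Int × Int × Int))) : Prop := out = classify_surface_interior_alt all_voxels
instance (all_voxels : List (Int × Int × Int)) (out : (List (Int × Int × Int)) × (List (Int × Int × Int))) : Decidable (Spec_classify_surface_interior all_voxels out) := by unfold Spec_classify_surface_interior; infer_instance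

-- ===== CLAIM =====
def Claim_equal_classify_surface_interior : Prop := ∀ (all_voxels : List (Int × Int × Int)), Dom_classify_surface_interior all_voxels → Spec_classify_surface_interior all_voxels (classify_surface_interior all_voxels)

-- ===== LEMMAS AND PROOFS =====

-- A's per-voxel surface test ('some 6-neighbor not in the list'), named for the proofs.
def pvSurf (xs : List (Int × Int × Int)) (v : Int × Int × Int) : Bool :=
  pvNeighbors6.any (fun d => !(xs.contains (v.1 + d.1, v.2.1 + d.2.1, v.2.2 + d.2.2)))

-- A's fold sends each voxel to one of the two buckets according to a predicate of the voxel
-- alone, so it equals updating each bucket with the corresponding filtered sublist.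
theorem pvFoldPair (p : (Int × Int × Int) → Bool) :
    ∀ (xs : List (Int × Int × Int)) (s i : PySem.Set (Int × Int × Int)),
      xs.foldl (fun acc v => if p v then (PySem.Set.add acc.1 v, acc.2) else (acc.1, PySem.Set.add acc.2 v)) (s, i)
        = (PySem.Set.update s (xs.filter p), PySem.Set.update i (xs.filter (fun v => !p v))) := by
  intro xs
  induction xs with
  | nil => intro s i; simp [PySem.Set.update]
  | cons v xs ih =>
      intro s i
      by_cases hp : p v = true
      · simp [List.foldl_cons, hp, PySem.Set.update_eq_foldl, ih]
      · simp only [Bool.not_eq_true] at hp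
        simp [List.foldl_cons, hp, PySem.Set.update_eq_foldl, ih]

-- dedup (set construction) commutes with filtering by a predicate of the element.
theorem pvOfListFilterAux {α : Type} [BEq α] [LawfulBEq α] (q : α → Bool) :
    ∀ (xs : List α) (s : PySem.Set α),
      (xs.foldl PySem.Set.add s).filter q = (xs.filter q).foldl PySem.Set.add (s.filter q) := by
  intro xs
  induction xs with
  | nil => intro s; simp
  | cons x xs ih =>
      intro s
      have hstep : (PySem.Set.add s x).filter q
          = if q x then PySem.Set.add (s.filter q) x else s.filter q := by
        unfold PySem.Set.add
        by_cases hm : x ∈ s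
        · by_cases hq : q x = true
          · simp [List.contains_eq_mem, List.mem_filter, hm, hq]
          · simp only [Bool.not_eq_true] at hq
            simp [List.contains_eq_mem, hm, hq]
        · by_cases hq : q x = true
          · simp [List.contains_eq_mem, List.mem_filter, hm, hq, List.filter_append]
          · simp only [Bool.not_eq_true] at hq
            simp [List.contains_eq_mem, hm, hq, List.filter_append]
      rw [List.foldl_cons, ih, hstep, List.filter_cons]
      by_cases hq : q x = true
      · simp [hq]
      · simp only [Bool.not_eq_true] at hq
        simp [hq]

theorem pvOfListFilter {α : Type} [BEq α] [LawfulBEq α] (q : α → Bool) (xs : List α) :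
    PySem.Set.ofList (xs.filter q) = (PySem.Set.ofList xs).filter q := by
  rw [PySem.Set.ofList_eq_foldl, PySem.Set.ofList_eq_foldl, pvOfListFilterAux]
  rfl

-- A's result, characterised as the two filters of the input.
theorem pvAChar (xs : List (Int × Int × Int)) :
    classify_surface_interior xs
      = (PySem.Set.ofList (xs.filter (pvSurf xs)),
         PySem.Set.ofList (xs.filter (fun v => !pvSurf xs v))) := by
  show xs.foldl
      (fun acc v => if pvSurf xs v then (PySem.Set.add acc.1 v, acc.2) else (acc.1, PySem.Set.add acc.2 v))
      ([], []) = _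
  rw [pvFoldPair (pvSurf xs) xs [] []]
  rfl

-- membership in the translate of the voxel list by -d is neighbor-presence in the list
theorem pvShiftContains (xs : List (Int × Int × Int)) (d v : Int × Int × Int) :
    (PySem.Set.ofList (xs.map (fun u => (u.1 - d.1, u.2.1 - d.2.1, u.2.2 - d.2.2)))).contains v
      = xs.contains (v.1 + d.1, v.2.1 + d.2.1, v.2.2 + d.2.2) := by
  simp only [List.contains_eq_mem, PySem.Set.contains_eq_listContains, decide_eq_decide,
    PySem.Set.mem_ofList, List.mem_map]
  constructor
  · rintro ⟨u, hu, rfl⟩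
    simpa using hu
  · intro h
    exact ⟨_, h, by simp⟩

-- Set.inter is a filter of its left argument by membership in the right
theorem pvInterEqFilter {α : Type} [BEq α] (s t : PySem.Set α) :
    PySem.Set.inter s t = s.filter (fun x => t.contains x) := rfl

-- folding intersections with translates = one filter by 'all 6 neighbors present'
theorem pvFoldInter (xs : List (Int × Int × Int)) :
    ∀ (ds : List (Int × Int × Int)) (s : PySem.Set (Int × Int × Int)),
      ds.foldl
        (fun acc d =>
          PySem.Set.inter acc
            (PySem.Set.ofList (xs.map (fun u => (u.1 - d.1, u.2.1 - d.2.1, u.2.2 - d.2.2))))) s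
        = s.filter (fun v => ds.all (fun d => xs.contains (v.1 + d.1, v.2.1 + d.2.1, v.2.2 + d.2.2))) := by
  intro ds
  induction ds with
  | nil => intro s; simp
  | cons d ds ih =>
      intro s
      rw [List.foldl_cons, ih, pvInterEqFilter, List.filter_filter]
      apply List.filter_congr
      intro v _
      rw [pvShiftContains]
      simp [Bool.and_comm]

-- B's result, characterised as the same two filters applied to the deduped set.
theorem pvBChar (xs : List (Int × Int × Int)) :
    classify_surface_interior_alt xs
      = ((PySem.Set.ofList xs).filter (pvSurf xs),
         (PySem.Set.ofList xs).filter (fun v => !pvSurf xs v)) := by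
  have hall : ∀ v : Int × Int × Int,
      (pvNeighbors6.all (fun d => xs.contains (v.1 + d.1, v.2.1 + d.2.1, v.2.2 + d.2.2)))
        = !pvSurf xs v := by
    intro v
    rw [pvSurf, List.all_eq_not_any_not]
  have hInt :
      classify_surface_interior_alt xs
        = (PySem.Set.diff (PySem.Set.ofList xs)
            ((PySem.Set.ofList xs).filter (fun v => !pvSurf xs v)),
           (PySem.Set.ofList xs).filter (fun v => !pvSurf xs v)) := by
    show (PySem.Set.diff (PySem.Set.ofList xs)
            (pvNeighbors6.foldl _ (PySem.Set.ofList xs)),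
          pvNeighbors6.foldl _ (PySem.Set.ofList xs)) = _
    rw [pvFoldInter xs pvNeighbors6 (PySem.Set.ofList xs),
        List.filter_congr (fun v _ => hall v)]
  rw [hInt]
  refine Prod.ext ?_ rfl
  unfold PySem.Set.diff
  apply List.filter_congr
  intro v hv
  by_cases hs : pvSurf xs v = true
  · have : v ∉ (PySem.Set.ofList xs).filter (fun v => !pvSurf xs v) := by
      simp [List.mem_filter, hs]
    simp [List.contains_eq_mem, this, hs]
  · simp only [Bool.not_eq_true] at hs
    have : v ∈ (PySem.Set.ofList xs).filter (fun v => !pvSurf xs v) := by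
      simp [List.mem_filter, hs, hv]
    simp [List.contains_eq_mem, this, hs]

-- ===== VERDICT =====
theorem classify_surface_interior_spec : Claim_equal_classify_surface_interior := by
  intro xs _
  unfold Spec_classify_surface_interior
  rw [pvAChar, pvBChar, pvOfListFilter, pvOfListFilter]
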